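-- pv_equiv track=rewrite | github.com/julianh2o/SequencingAutomationScripts | translate.py | countWithoutStop
-- ===== SOURCE A (Python) =====
-- def countWithoutStop(translated):
--     count = 0;
--     maxCount = 0;
--     for c in translated:
--         if (c == '*'): count = 0;
--         count += 1;
--         if (count > maxCount): maxCount = count;
--     return maxCount;
-- ===== SOURCE B (Python) =====
-- def countWithoutStop(translated):
--     # Split on '*' into segments; a '*' starts a run counting itself, so every
--     # segment after the first contributes len(segment) + 1.
--     parts = translated.split('*')
--     best = len(parts[0])
--     for p in parts[1:]:
--         best = max(best, 1 + len(p))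
--     return best
-- ===== Notes on version B (the rewrite author's own statement) =====
-- stated objective: faster
-- what changed: Instead of a single Python-level pass with a running counter and running maximum, B splits the string on the star character with str.split and takes the max of the first segment's length and 1+length for each later segment (a star counts itself in the run it starts); the scan moves into the C-level split/len built-ins.
import Mathlib
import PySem

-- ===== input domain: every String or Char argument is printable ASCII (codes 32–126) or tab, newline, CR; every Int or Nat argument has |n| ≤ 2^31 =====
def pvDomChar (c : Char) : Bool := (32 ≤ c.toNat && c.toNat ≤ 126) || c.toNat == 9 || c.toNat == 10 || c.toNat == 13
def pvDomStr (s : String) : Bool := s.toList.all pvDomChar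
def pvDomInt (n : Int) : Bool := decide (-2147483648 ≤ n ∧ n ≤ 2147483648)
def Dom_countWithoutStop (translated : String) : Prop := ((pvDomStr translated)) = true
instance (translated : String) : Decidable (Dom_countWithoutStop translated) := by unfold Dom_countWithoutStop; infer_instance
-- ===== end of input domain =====

-- B replaces A's one-pass counter/maximum loop by splitting on the star character and taking the max of segment lengths (+1 for segments after the first, since a star counts itself); same value, measured faster in Python (C-level split).

-- ===== PORT A =====
def countWithoutStop (translated : String) : Int :=
  (translated.toList.foldl
    (fun (st : Int × Int) c =>
      let count := if c == '*' then (0 : Int) else st.1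
      let count := count + 1
      let maxCount := if count > st.2 then count else st.2
      (count, maxCount))
    (0, 0)).2

-- ===== PORT B =====
-- hand port of Python str.split('*') (exact for a single-character separator: keeps empty segments, "" -> [""])
def pvSplitStar : List Char → List (List Char)
  | [] => [[]]
  | c :: t =>
    if c = '*' then [] :: pvSplitStar t
    else
      match pvSplitStar t with
      | [] => [[c]]
      | h :: r => (c :: h) :: r

def countWithoutStop_alt (translated : String) : Int :=
  match pvSplitStar translated.toList with
  | [] => 0
  | p0 :: rest => rest.foldl (fun best p => max best (1 + (p.length : Int))) ((p0.length : Int))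

-- ===== PRECONDITION & SPEC =====
def Spec_countWithoutStop (translated : String) (out : Int) : Prop := out = countWithoutStop_alt translated
instance (translated : String) (out : Int) : Decidable (Spec_countWithoutStop translated out) := by unfold Spec_countWithoutStop; infer_instance

-- ===== CLAIM (what is proved, stated in full; the proofs are below) =====
def Claim_equal_countWithoutStop : Prop := ∀ (translated : String), Dom_countWithoutStop translated → Spec_countWithoutStop translated (countWithoutStop translated)

-- ===== LEMMAS AND PROOFS =====

theorem pvSplitStar_ne_nil (l : List Char) : pvSplitStar l ≠ [] := by
  cases l with
  | nil => simp [pvSplitStar]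
  | cons c t =>
    simp only [pvSplitStar]
    split
    · simp
    · split <;> simp

-- B's fold seeded with the generalized state (cnt, M) of A's loop
def pvB' (l : List Char) (cnt M : Int) : Int :=
  match pvSplitStar l with
  | [] => M
  | h :: r => r.foldl (fun b p => max b (1 + (p.length : Int))) (max M (cnt + (h.length : Int)))

theorem pv_main (l : List Char) : ∀ cnt M : Int, cnt ≤ M →
    (l.foldl
      (fun (st : Int × Int) c =>
        let count := if c == '*' then (0 : Int) else st.1
        let count := count + 1
        let maxCount := if count > st.2 then count else st.2
        (count, maxCount))
      (cnt, M)).2 = pvB' l cnt M := by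
  induction l with
  | nil =>
    intro cnt M h
    simp [pvB', pvSplitStar]
    omega
  | cons c t ih =>
    intro cnt M h
    obtain ⟨hd, r, hsp⟩ : ∃ hd r, pvSplitStar t = hd :: r := by
      cases hx : pvSplitStar t with
      | nil => exact absurd hx (pvSplitStar_ne_nil t)
      | cons a b => exact ⟨a, b, rfl⟩
    rw [List.foldl_cons]
    by_cases hc : c = '*'
    · subst hc
      have hstep : ((if (('*' : Char) == '*') = true then (0 : Int) else cnt) + 1,
          if (if (('*' : Char) == '*') = true then (0 : Int) else cnt) + 1 > M
          then (if (('*' : Char) == '*') = true then (0 : Int) else cnt) + 1 else M)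
          = ((1 : Int), max M 1) := by
        simp only [beq_self_eq_true, if_true, Prod.mk.injEq]
        constructor
        · omega
        · split_ifs <;> omega
      show (List.foldl _ ((if (('*' : Char) == '*') = true then (0 : Int) else cnt) + 1,
          if (if (('*' : Char) == '*') = true then (0 : Int) else cnt) + 1 > M
          then (if (('*' : Char) == '*') = true then (0 : Int) else cnt) + 1 else M) t).2 = _
      rw [hstep, ih 1 (max M 1) (le_max_right _ _)]
      simp only [pvB', pvSplitStar, if_pos trivial, hsp]
      show List.foldl (fun b p => max b (1 + (p.length : Int))) (max (max M 1) (1 + (hd.length : Int))) r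
         = List.foldl (fun b p => max b (1 + (p.length : Int)))
             (max (max M (cnt + (([] : List Char).length : Int))) (1 + (hd.length : Int))) r
      congr 1
      simp only [List.length_nil, Nat.cast_zero]
      omega
    · have hb : (c == '*') = false := by simp [hc]
      have hstep : ((if (c == '*') = true then (0 : Int) else cnt) + 1,
          if (if (c == '*') = true then (0 : Int) else cnt) + 1 > M
          then (if (c == '*') = true then (0 : Int) else cnt) + 1 else M)
          = (cnt + 1, max M (cnt + 1)) := by
        simp only [hb, Bool.false_eq_true, if_false]
        rw [Prod.mk.injEq]
        exact ⟨rfl, by split_ifs <;> omega⟩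
      show (List.foldl _ ((if (c == '*') = true then (0 : Int) else cnt) + 1,
          if (if (c == '*') = true then (0 : Int) else cnt) + 1 > M
          then (if (c == '*') = true then (0 : Int) else cnt) + 1 else M) t).2 = _
      rw [hstep, ih (cnt + 1) (max M (cnt + 1)) (le_max_right _ _)]
      simp only [pvB', pvSplitStar, if_neg hc, hsp]
      congr 1
      simp only [List.length_cons]
      push_cast
      omega

-- ===== VERDICT (by name: the statement is the Claim_ definition above) =====
theorem countWithoutStop_spec : Claim_equal_countWithoutStop := by
  intro s _
  unfold Spec_countWithoutStop countWithoutStop countWithoutStop_alt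
  rw [pv_main s.toList 0 0 le_rfl]
  unfold pvB'
  cases hx : pvSplitStar s.toList with
  | nil => exact absurd hx (pvSplitStar_ne_nil _)
  | cons h r =>
    show List.foldl (fun b p => max b (1 + (p.length : Int))) (max 0 (0 + (h.length : Int))) r
       = List.foldl (fun best p => max best (1 + (p.length : Int))) ((h.length : Int)) r
    congr 1
    omega
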